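-- pv_equiv track=rewrite | github.com/moerbeke/aoc-2024 | aoc14.py | is_tree_by_row
-- ===== SOURCE A (Python) =====
-- def is_tree_by_row(lobby, X, Y):
--     for y in range(Y):
--         n = 0
--         lastx = -2
--         for x in range(X):
--             p = (x,y)
--             if p in lobby and x == lastx+1:
--                 n += 1
--                 if n > 10:
--                     return True
--             else:
--                 n = 0
--             lastx = x
--     return False
-- ===== SOURCE B (Python) =====
-- def is_tree_by_row(lobby, X, Y):
--     # Iterate over the occupied points themselves (hash-set lookups) instead of
--     # scanning the whole X*Y grid: a run of 11 consecutive occupied cells in a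
--     # row exists iff some occupied point (x, y) with x >= 1, x+10 < X, 0 <= y < Y
--     # has its 10 right neighbours occupied too.  (Column 0 never starts a
--     # counted run in this task's semantics.)
--     pts = set(lobby)
--     for (x, y) in pts:
--         if 1 <= x and x + 10 < X and 0 <= y < Y and all((x + k, y) in pts for k in range(1, 11)):
--             return True
--     return False
-- ===== Notes on version B (the rewrite author's own statement) =====
-- stated objective: faster
-- what changed: B builds a hash set of the points once and iterates over the occupied points, checking each candidate's 10 right neighbours, instead of A's scan of every cell of the X*Y grid with a list membership test per cell.
import Mathlib
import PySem

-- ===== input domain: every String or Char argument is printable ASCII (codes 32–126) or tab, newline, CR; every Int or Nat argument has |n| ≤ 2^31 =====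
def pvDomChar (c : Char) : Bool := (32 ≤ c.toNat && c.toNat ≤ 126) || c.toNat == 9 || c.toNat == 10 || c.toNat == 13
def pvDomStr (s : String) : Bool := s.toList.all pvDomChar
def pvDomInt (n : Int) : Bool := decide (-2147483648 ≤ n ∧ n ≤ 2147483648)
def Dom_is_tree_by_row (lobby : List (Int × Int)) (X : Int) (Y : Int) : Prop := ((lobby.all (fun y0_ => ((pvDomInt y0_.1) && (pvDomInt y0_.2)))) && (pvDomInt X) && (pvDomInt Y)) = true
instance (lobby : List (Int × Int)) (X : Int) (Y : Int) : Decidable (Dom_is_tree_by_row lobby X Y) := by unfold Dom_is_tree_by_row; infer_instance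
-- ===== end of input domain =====

-- B replaces A's whole-grid scan by a single pass over the occupied points with
-- hash-set neighbour lookups (asymptotically faster; equal return values proved below).

-- ===== PORT A =====
-- inner loop: 'for x in range(X)' with state (n, lastx) and early 'return True'
def aInner (lobby : List (Int × Int)) (y : Int) (xs : List Int) (n lastx : Int) : Bool :=
  match xs with
  | [] => false
  | x :: rest =>
    if (x, y) ∈ lobby ∧ x = lastx + 1 then
      if n + 1 > 10 then true else aInner lobby y rest (n + 1) x
    else aInner lobby y rest 0 x

-- outer loop: 'for y in range(Y)', propagating the early return
def aOuter (lobby : List (Int × Int)) (X : Int) (ys : List Int) : Bool :=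
  match ys with
  | [] => false
  | y :: rest =>
    if aInner lobby y (PySem.List.pyRange 0 X 1) 0 (-2) then true
    else aOuter lobby X rest

def is_tree_by_row (lobby : List (Int × Int)) (X : Int) (Y : Int) : Bool :=
  aOuter lobby X (PySem.List.pyRange 0 Y 1)

-- ===== PORT B =====
-- the per-point test of Source B's loop body
def bRun (pts : PySem.Set (Int × Int)) (X : Int) (Y : Int) (p : Int × Int) : Bool :=
  decide (1 ≤ p.1) && decide (p.1 + 10 < X) && decide (0 ≤ p.2) && decide (p.2 < Y) &&
  (PySem.List.pyRange 1 11 1).all (fun k => PySem.Set.contains pts (p.1 + k, p.2))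

def is_tree_by_row_alt (lobby : List (Int × Int)) (X : Int) (Y : Int) : Bool :=
  let pts := PySem.Set.ofList lobby
  pts.any (fun p => bRun pts X Y p)

-- ===== PRECONDITION & SPEC =====
def Spec_is_tree_by_row (lobby : List (Int × Int)) (X : Int) (Y : Int) (out : Bool) : Prop := out = is_tree_by_row_alt lobby X Y
instance (lobby : List (Int × Int)) (X : Int) (Y : Int) (out : Bool) : Decidable (Spec_is_tree_by_row lobby X Y out) := by unfold Spec_is_tree_by_row; infer_instance

-- ===== CLAIM (what is proved, stated in full; the proofs are below) =====
def Claim_equal_is_tree_by_row : Prop := ∀ (lobby : List (Int × Int)) (X : Int) (Y : Int), Dom_is_tree_by_row lobby X Y → Spec_is_tree_by_row lobby X Y (is_tree_by_row lobby X Y)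

-- ===== LEMMAS AND PROOFS =====

-- 'some column x0 ≥ 1 starts a row of 11 consecutive occupied cells of row y inside the grid'
def Good (lobby : List (Int × Int)) (X y x0 : Int) : Prop :=
  1 ≤ x0 ∧ x0 + 10 < X ∧ ∀ k : Int, 0 ≤ k → k ≤ 10 → (x0 + k, y) ∈ lobby

-- invariant characterisation of A's inner loop from position a with streak credit n
theorem inner_char (lobby : List (Int × Int)) (X y : Int) :
    ∀ (t : Nat) (a n : Int), (X - a).toNat = t → 1 ≤ a → 0 ≤ n → n ≤ a - 1 →
    (∀ j : Int, a - n ≤ j → j < a → (j, y) ∈ lobby) →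
    (aInner lobby y (PySem.List.pyRange a X 1) n (a - 1) = true ↔
      ∃ x' : Int, a ≤ x' ∧ x' < X ∧ a - n ≤ x' - 10 ∧
        ∀ k : Int, 0 ≤ k → k ≤ 10 → (x' - k, y) ∈ lobby) := by
  intro t
  induction t with
  | zero =>
    intro a n ht _ _ _ _
    rw [PySem.List.pyRange_one_eq_nil (by omega)]
    simp only [aInner]
    constructor
    · intro h; exact absurd h (by simp)
    · rintro ⟨x', h1, h2, _⟩; omega
  | succ t ih =>
    intro a n ht ha hn hna hocc
    have haX : a < X := by omega
    rw [PySem.List.pyRange_one_cons haX]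
    simp only [aInner]
    have hcond : ((a, y) ∈ lobby ∧ a = (a - 1) + 1) ↔ (a, y) ∈ lobby := by
      constructor
      · exact fun h => h.1
      · exact fun h => ⟨h, by omega⟩
    by_cases hmem : (a, y) ∈ lobby
    · rw [if_pos (hcond.mpr hmem)]
      by_cases hbig : n + 1 > 10
      · rw [if_pos hbig]
        constructor
        · intro _
          refine ⟨a, le_refl a, haX, by omega, ?_⟩
          intro k hk0 hk10
          by_cases hk : k = 0
          · subst hk; simpa using hmem
          · exact hocc (a - k) (by omega) (by omega)
        · intro _; rfl
      · rw [if_neg hbig]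
        have hrec := ih (a + 1) (n + 1) (by omega) (by omega) (by omega) (by omega)
          (by
            intro j h1 h2
            by_cases hj : j = a
            · subst hj; exact hmem
            · exact hocc j (by omega) (by omega))
        have hlast : a + 1 - 1 = a := by omega
        rw [hlast] at hrec
        rw [hrec]
        constructor
        · rintro ⟨x', h1, h2, h3, h4⟩
          exact ⟨x', by omega, h2, by omega, h4⟩
        · rintro ⟨x', h1, h2, h3, h4⟩
          have hx' : a + 1 ≤ x' := by
            by_contra hlt
            have hx : x' = a := by omega
            omega
          exact ⟨x', hx', h2, by omega, h4⟩
    · rw [if_neg (fun h => hmem (hcond.mp h))]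
      have hrec := ih (a + 1) 0 (by omega) (by omega) (by omega) (by omega)
        (by intro j h1 h2; omega)
      have hlast : a + 1 - 1 = a := by omega
      rw [hlast] at hrec
      rw [hrec]
      constructor
      · rintro ⟨x', h1, h2, h3, h4⟩
        exact ⟨x', by omega, h2, by omega, h4⟩
      · rintro ⟨x', h1, h2, h3, h4⟩
        -- a is not occupied, so the whole run x'-10..x' lies strictly right of a
        have hout : a + 10 < x' := by
          by_contra hle
          exact hmem (by
            have := h4 (x' - a) (by omega) (by omega)
            simpa [show x' - (x' - a) = a by omega] using this)
        exact ⟨x', by omega, h2, by omega, h4⟩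

-- A's inner loop from its real initial state (n = 0, lastx = -2)
theorem row_char (lobby : List (Int × Int)) (X y : Int) :
    (aInner lobby y (PySem.List.pyRange 0 X 1) 0 (-2) = true) ↔ ∃ x0, Good lobby X y x0 := by
  by_cases hX : X ≤ 0
  · rw [PySem.List.pyRange_one_eq_nil hX]
    simp only [aInner, Good]
    constructor
    · intro h; exact absurd h (by simp)
    · rintro ⟨x0, h1, h2, _⟩; omega
  · push Not at hX
    rw [PySem.List.pyRange_one_cons hX]
    have h01 : (0 : Int) + 1 = 1 := by omega
    rw [h01]
    simp only [aInner]
    have hcond : ¬(((0 : Int), y) ∈ lobby ∧ (0 : Int) = -2 + 1) := by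
      rintro ⟨_, h⟩; omega
    rw [if_neg hcond]
    have h := inner_char lobby X y (X - 1).toNat 1 0 (by omega) (by omega) (by omega) (by omega)
      (by intro j h1 h2; omega)
    have h0 : (1 : Int) - 1 = 0 := by omega
    rw [h0] at h
    rw [h]
    constructor
    · rintro ⟨x', h1, h2, h3, h4⟩
      refine ⟨x' - 10, by omega, by omega, ?_⟩
      intro k hk0 hk10
      have := h4 (10 - k) (by omega) (by omega)
      simpa [show x' - (10 - k) = x' - 10 + k by omega] using this
    · rintro ⟨x0, h1, h2, h3⟩
      refine ⟨x0 + 10, by omega, by omega, by omega, ?_⟩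
      intro k hk0 hk10
      have := h3 (10 - k) (by omega) (by omega)
      simpa [show x0 + (10 - k) = x0 + 10 - k by omega] using this

-- A's outer loop is an existential over the rows it visits
theorem outer_char (lobby : List (Int × Int)) (X : Int) (ys : List Int) :
    (aOuter lobby X ys = true) ↔
      ∃ y ∈ ys, aInner lobby y (PySem.List.pyRange 0 X 1) 0 (-2) = true := by
  induction ys with
  | nil => simp [aOuter]
  | cons y rest ih =>
    simp only [aOuter]
    cases hb : aInner lobby y (PySem.List.pyRange 0 X 1) 0 (-2) with
    | true => simp only [if_true, true_iff, List.mem_cons]; exact ⟨y, Or.inl rfl, hb⟩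
    | false =>
      rw [if_neg (by simp), ih]
      simp only [List.mem_cons]
      constructor
      · rintro ⟨y', hy', hrun⟩; exact ⟨y', Or.inr hy', hrun⟩
      · rintro ⟨y', hy', hrun⟩
        rcases hy' with rfl | hy'
        · rw [hb] at hrun; exact absurd hrun (by simp)
        · exact ⟨y', hy', hrun⟩

-- B is the same existential, read off the point list
theorem alt_char (lobby : List (Int × Int)) (X Y : Int) :
    (is_tree_by_row_alt lobby X Y = true) ↔
      ∃ p ∈ lobby, 1 ≤ p.1 ∧ p.1 + 10 < X ∧ 0 ≤ p.2 ∧ p.2 < Y ∧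
        ∀ k : Int, 1 ≤ k → k < 11 → (p.1 + k, p.2) ∈ lobby := by
  simp only [is_tree_by_row_alt, List.any_eq_true, bRun, Bool.and_eq_true, decide_eq_true_eq,
    List.all_eq_true, PySem.Set.contains, List.contains_iff_mem, PySem.Set.mem_ofList,
    PySem.List.mem_pyRange_one]
  constructor
  · rintro ⟨p, hp, ⟨⟨⟨h1, h2⟩, h3⟩, h4⟩, h5⟩
    exact ⟨p, hp, h1, h2, h3, h4, fun k hk1 hk2 => h5 k ⟨hk1, hk2⟩⟩
  · rintro ⟨p, hp, h1, h2, h3, h4, h5⟩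
    exact ⟨p, hp, ⟨⟨⟨h1, h2⟩, h3⟩, h4⟩, fun k hk => h5 k hk.1 hk.2⟩

-- ===== VERDICT (by name: the statement is the Claim_ definition above) =====
theorem is_tree_by_row_spec : Claim_equal_is_tree_by_row := by
  intro lobby X Y _
  unfold Spec_is_tree_by_row
  rw [Bool.eq_iff_iff, alt_char]
  unfold is_tree_by_row
  rw [outer_char]
  constructor
  · rintro ⟨y, hy, hrun⟩
    rw [PySem.List.mem_pyRange_one] at hy
    obtain ⟨x0, h1, h2, h3⟩ := (row_char lobby X y).mp hrun
    refine ⟨(x0, y), by simpa using h3 0 le_rfl (by omega), h1, h2, hy.1, hy.2, ?_⟩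
    intro k hk1 hk2
    exact h3 k (by omega) (by omega)
  · rintro ⟨p, hp, h1, h2, h3, h4, h5⟩
    refine ⟨p.2, PySem.List.mem_pyRange_one.mpr ⟨h3, h4⟩, ?_⟩
    rw [row_char]
    refine ⟨p.1, h1, h2, ?_⟩
    intro k hk0 hk10
    by_cases hk : k = 0
    · subst hk; simpa using hp
    · exact h5 k (by omega) (by omega)
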